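-- pv_equiv track=rewrite | github.com/Kregiss/TFL | lab4/fuzz_test.py | parse_optimal
-- ===== SOURCE A (Python) =====
-- def parse_optimal(word):
--     n = len(word)
--     memo = {}  # key = (sym, pos) -> list of (next_pos, attr)
--
--     def parse_S(i):
--         key = ('S', i)
--         if key in memo:
--             return memo[key]
--         res = []
--         # S -> abP
--         if i+1 < n and word[i:i+2] == "ab":
--             for (j, a) in parse_P(i+2):
--                 res.append((j, a))
--         # S -> baP
--         if i+1 < n and word[i:i+2] == "ba":
--             for (j, a) in parse_P(i+2):
--                 res.append((j, a))
--         # S -> ab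
--         if i+1 < n and word[i:i+2] == "ab":
--             res.append((i+2, 2))
--         # S -> ba
--         if i+1 < n and word[i:i+2] == "ba":
--             res.append((i+2, 3))
--         memo[key] = res
--         return res
--
--     def parse_P(i):
--         key = ('P', i)
--         if key in memo:
--             return memo[key]
--         res = []
--         if i < n and word[i] == 'b':
--             # P -> bTaP
--             for (jT, aT) in parse_T(i+1):
--                 if jT < n and word[jT] == 'a':
--                     for (jP, aP) in parse_P(jT+1):
--                         res.append((jP, aP))
--             # P -> bTa
--             for (jT, aT) in parse_T(i+1):
--                 if jT < n and word[jT] == 'a':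
--                     res.append((jT+1, aT))
--         memo[key] = res
--         return res
--
--     def parse_T(i):
--         key = ('T', i)
--         if key in memo:
--             return memo[key]
--         res = []
--         # T -> SS
--         for (j1, a1) in parse_S(i):
--             for (j2, a2) in parse_S(j1):
--                 if a1 == a2:
--                     res.append((j2, a1 * a2))
--         # T -> bT
--         if i < n and word[i] == 'b':
--             for (j, a) in parse_T(i+1):
--                 res.append((j, a + 1))
--         memo[key] = res
--         return res
--
--     results = parse_S(0)
--     accepts = any((pos == n) for (pos, _) in results)
--     attrs = [a for (pos, a) in results if pos == n]
--     return accepts, attrs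
-- ===== SOURCE B (Python) =====
-- def parse_optimal(word):
--     n = len(word)
--     # Bottom-up chart parsing: fill arrays S/P/T of parse lists from position n down to 0,
--     # replacing A's memoized top-down recursion; same lists, same order.
--     S = [[] for _ in range(n + 1)]
--     P = [[] for _ in range(n + 1)]
--     T = [[] for _ in range(n + 1)]
--     for i in range(n, -1, -1):
--         two = word[i:i+2]
--         if i + 1 < n and two in ("ab", "ba"):
--             S[i] = P[i+2] + [(i + 2, 2 if two == "ab" else 3)]
--         t = [(j2, a1 * a2) for (j1, a1) in S[i] for (j2, a2) in S[j1] if a1 == a2]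
--         if i < n and word[i] == 'b':
--             t += [(j, a + 1) for (j, a) in T[i+1]]
--             ok = [(jT, aT) for (jT, aT) in T[i+1] if jT < n and word[jT] == 'a']
--             P[i] = [r for (jT, _) in ok for r in P[jT+1]] + [(jT + 1, aT) for (jT, aT) in ok]
--         T[i] = t
--     attrs = [a for (pos, a) in S[0] if pos == n]
--     return len(attrs) > 0, attrs
-- ===== Notes on version B (the rewrite author's own statement) =====
-- stated objective: alternative
-- what changed: A is a memoized top-down recursive-descent enumerator (three mutually recursive functions threading a memo dict); B is a bottom-up chart parser: it fills arrays S/P/T of parse lists iteratively from position n down to 0 with only array reads, no recursion and no memo dict, and computes the accepted flag from the collected attribute list instead of a separate scan.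
import Mathlib
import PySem

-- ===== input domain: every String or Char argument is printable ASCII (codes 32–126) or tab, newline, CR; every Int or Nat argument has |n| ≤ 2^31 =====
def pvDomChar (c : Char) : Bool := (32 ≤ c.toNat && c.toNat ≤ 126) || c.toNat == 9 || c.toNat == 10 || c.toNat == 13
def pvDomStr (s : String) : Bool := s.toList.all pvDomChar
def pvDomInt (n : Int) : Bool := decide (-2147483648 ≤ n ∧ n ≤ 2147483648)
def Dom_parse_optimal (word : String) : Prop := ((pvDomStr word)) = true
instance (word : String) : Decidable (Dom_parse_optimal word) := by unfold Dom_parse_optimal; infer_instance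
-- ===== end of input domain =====

-- B replaces A's memoized top-down recursion by bottom-up chart parsing (arrays filled from
-- position n down to 0); same parse lists in the same order, objective: alternative.

abbrev PMemo := PySem.Dict (String × Int) (List (Int × Int))

-- ===== PORT A =====
-- A: memoized mutual recursion; the memo dict is threaded through in evaluation order and
-- each Python 'for' loop is the corresponding foldl over (result list, memo).
-- 'fuel' is a totality guard only (Python's recursion terminates because every parse
-- result advances the position); parse_optimal supplies more than enough.
mutual
def parseS_A (w : List Char) (fuel : Nat) (i : Int) (memo : PMemo) :
    List (Int × Int) × PMemo :=
  match fuel with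
  | 0 => ([], memo)
  | fuel + 1 =>
    match memo.get? ("S", i) with
    | some v => (v, memo)
    | none =>
      -- S -> abP
      let s1 : List (Int × Int) × PMemo :=
        if i + 1 < (w.length : Int) ∧ PySem.List.slice w (some i) (some (i+2)) = ['a','b'] then
          (([] : List (Int × Int)) ++ (parseP_A w fuel (i+2) memo).1, (parseP_A w fuel (i+2) memo).2)
        else ([], memo)
      -- S -> baP
      let s2 : List (Int × Int) × PMemo :=
        if i + 1 < (w.length : Int) ∧ PySem.List.slice w (some i) (some (i+2)) = ['b','a'] then
          (s1.1 ++ (parseP_A w fuel (i+2) s1.2).1, (parseP_A w fuel (i+2) s1.2).2)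
        else s1
      -- S -> ab
      let res2 : List (Int × Int) :=
        if i + 1 < (w.length : Int) ∧ PySem.List.slice w (some i) (some (i+2)) = ['a','b'] then
          s2.1 ++ [(i+2, (2 : Int))] else s2.1
      -- S -> ba
      let res3 : List (Int × Int) :=
        if i + 1 < (w.length : Int) ∧ PySem.List.slice w (some i) (some (i+2)) = ['b','a'] then
          res2 ++ [(i+2, (3 : Int))] else res2
      (res3, s2.2.insert ("S", i) res3)
termination_by structural fuel

def parseP_A (w : List Char) (fuel : Nat) (i : Int) (memo : PMemo) :
    List (Int × Int) × PMemo :=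
  match fuel with
  | 0 => ([], memo)
  | fuel + 1 =>
    match memo.get? ("P", i) with
    | some v => (v, memo)
    | none =>
      let s : List (Int × Int) × PMemo :=
        if i < (w.length : Int) ∧ PySem.List.pyGet? w i = some 'b' then
          -- P -> bTaP
          let t1 := parseT_A w fuel (i+1) memo
          let l1 := t1.1.foldl (fun s p =>
              if decide (p.1 < (w.length : Int) ∧ PySem.List.pyGet? w p.1 = some 'a') then
                (s.1 ++ (parseP_A w fuel (p.1 + 1) s.2).1, (parseP_A w fuel (p.1 + 1) s.2).2)
              else s) (([] : List (Int × Int)), t1.2)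
          -- P -> bTa
          let t2 := parseT_A w fuel (i+1) l1.2
          (t2.1.foldl (fun r p =>
              if decide (p.1 < (w.length : Int) ∧ PySem.List.pyGet? w p.1 = some 'a') then
                r ++ [(p.1 + 1, p.2)] else r) l1.1, t2.2)
        else ([], memo)
      (s.1, s.2.insert ("P", i) s.1)
termination_by structural fuel

def parseT_A (w : List Char) (fuel : Nat) (i : Int) (memo : PMemo) :
    List (Int × Int) × PMemo :=
  match fuel with
  | 0 => ([], memo)
  | fuel + 1 =>
    match memo.get? ("T", i) with
    | some v => (v, memo)
    | none =>
      -- T -> SS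
      let s0 := parseS_A w fuel i memo
      let l := s0.1.foldl (fun s q =>
          ((parseS_A w fuel q.1 s.2).1.foldl
              (fun rr p => if p.2 == q.2 then rr ++ [(p.1, q.2 * p.2)] else rr) s.1,
           (parseS_A w fuel q.1 s.2).2)) (([] : List (Int × Int)), s0.2)
      -- T -> bT
      let s : List (Int × Int) × PMemo :=
        if i < (w.length : Int) ∧ PySem.List.pyGet? w i = some 'b' then
          ((parseT_A w fuel (i+1) l.2).1.foldl (fun r p => r ++ [(p.1, p.2 + 1)]) l.1,
           (parseT_A w fuel (i+1) l.2).2)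
        else l
      (s.1, s.2.insert ("T", i) s.1)
termination_by structural fuel
end

def parse_optimal (word : String) : Bool × List Int :=
  let w := word.toList
  let results := (parseS_A w (3 * w.length + 1) 0 PySem.Dict.empty).1
  let accepts := results.any (fun p => p.1 == (w.length : Int))
  let attrs := (results.filter (fun p => p.1 == (w.length : Int))).map (fun p => p.2)
  (accepts, attrs)

-- ===== PORT B =====
-- B: bottom-up chart parsing. tblGetB base tbl j reads the chart entry for absolute
-- position j when the chart's head holds position base (Source B indexes its arrays only at
-- positions the bounds lemmas below prove to be in range, so the .toNat clamp и the []
-- default are never hit on reachable lookups).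
def tblGetB (base : Int) (tbl : List (List (Int × Int))) (j : Int) : List (Int × Int) :=
  tbl.getD (j - base).toNat []

-- one iteration of Source B's "for i in range(n, -1, -1)" loop body: fills position i
-- (= the new heads) given the charts sT/pT/tT for positions i+1 .. n
def stepB (w : List Char) (i : Int)
    (sT pT tT : List (List (Int × Int))) :
    List (List (Int × Int)) × List (List (Int × Int)) × List (List (Int × Int)) :=
  let n : Int := (w.length : Int)
  let two := PySem.List.slice w (some i) (some (i+2))
  let s : List (Int × Int) :=
    if i + 1 < n ∧ (two = ['a','b'] ∨ two = ['b','a']) then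
      tblGetB (i+1) pT (i+2) ++ [(i+2, if two = ['a','b'] then (2 : Int) else 3)]
    else []
  let t0 : List (Int × Int) :=
    s.flatMap (fun q =>
      ((tblGetB (i+1) sT q.1).filter (fun p => p.2 == q.2)).map (fun p => (p.1, q.2 * p.2)))
  if i < n ∧ PySem.List.pyGet? w i = some 'b' then
    let t := t0 ++ (tblGetB (i+1) tT (i+1)).map (fun p => (p.1, p.2 + 1))
    let ok := (tblGetB (i+1) tT (i+1)).filter
      (fun q => decide (q.1 < n ∧ PySem.List.pyGet? w q.1 = some 'a'))
    let p := ok.flatMap (fun q => tblGetB (i+1) pT (q.1 + 1)) ++ ok.map (fun q => (q.1 + 1, q.2))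
    (s :: sT, p :: pT, t :: tT)
  else (s :: sT, ([] : List (Int × Int)) :: pT, t0 :: tT)

-- k loop iterations: charts for positions (n+1-k) .. n (head = lowest position)
def tablesB (w : List Char) :
    Nat → List (List (Int × Int)) × List (List (Int × Int)) × List (List (Int × Int))
  | 0 => ([], [], [])
  | k + 1 =>
    let prev := tablesB w k
    stepB w ((w.length : Int) - k) prev.1 prev.2.1 prev.2.2

def parse_optimal_alt (word : String) : Bool × List Int :=
  let w := word.toList
  let tabs := tablesB w (w.length + 1)
  let s0 := tabs.1.getD 0 []
  let attrs := (s0.filter (fun p => p.1 == (w.length : Int))).map (fun p => p.2)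
  (decide (attrs.length > 0), attrs)

-- ===== PRECONDITION & SPEC =====
def Spec_parse_optimal (word : String) (out : Bool × List Int) : Prop := out = parse_optimal_alt word
instance (word : String) (out : Bool × List Int) : Decidable (Spec_parse_optimal word out) := by unfold Spec_parse_optimal; infer_instance

-- ===== CLAIM (what is proved, stated in full; the proofs are below) =====
def Claim_equal_parse_optimal : Prop := ∀ (word : String), Dom_parse_optimal word → Spec_parse_optimal word (parse_optimal word)

-- ===== LEMMAS AND PROOFS =====

-- proof-only middle ground: the naive (unmemoized) recursive enumerator; both ports are
-- proved equal to it
mutual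
def parseS_N (w : List Char) (i : Int) : List (Int × Int) :=
  if h : i + 1 ≥ (w.length : Int) ∨
      (PySem.List.slice w (some i) (some (i+2)) ≠ ['a','b'] ∧
       PySem.List.slice w (some i) (some (i+2)) ≠ ['b','a']) then []
  else
    parseP_N w (i+2) ++
      [(i+2, if PySem.List.slice w (some i) (some (i+2)) = ['a','b'] then (2 : Int) else 3)]

termination_by (3 * (((w.length : Int)) - i).toNat, 1, 0)
decreasing_by
  all_goals simp_wf
  all_goals try (push_neg at h)
  all_goals try (obtain ⟨⟨h1, h2⟩, h3⟩ := h)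
  all_goals try (obtain ⟨h1, h2⟩ := h)
  all_goals first
    | (apply Prod.Lex.left; omega)
    | (apply Prod.Lex.right; apply Prod.Lex.left; omega)
    | (apply Prod.Lex.right; apply Prod.Lex.right; omega)
def parseP_N (w : List Char) (i : Int) : List (Int × Int) :=
  if h : i < (w.length : Int) ∧ PySem.List.pyGet? w i = some 'b' then
    let ts := (parseT_N w (i+1)).filter
      (fun p => decide (p.1 < (w.length : Int) ∧ PySem.List.pyGet? w p.1 = some 'a'))
    pFlatN w i ts ++ ts.map (fun p => (p.1 + 1, p.2))
  else []

termination_by (3 * (((w.length : Int)) - i).toNat + 1, 1, 0)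
decreasing_by
  all_goals simp_wf
  all_goals try (push_neg at h)
  all_goals try (obtain ⟨⟨h1, h2⟩, h3⟩ := h)
  all_goals try (obtain ⟨h1, h2⟩ := h)
  all_goals first
    | (apply Prod.Lex.left; omega)
    | (apply Prod.Lex.right; apply Prod.Lex.left; omega)
    | (apply Prod.Lex.right; apply Prod.Lex.right; omega)
def pFlatN (w : List Char) (i : Int) (ts : List (Int × Int)) : List (Int × Int) :=
  match ts with
  | [] => []
  | p :: rest =>
    (if h : i ≤ p.1 ∧ p.1 < (w.length : Int) then parseP_N w (p.1 + 1) else []) ++ pFlatN w i rest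

termination_by (3 * (((w.length : Int)) - i).toNat + 1, 0, ts.length)
decreasing_by
  all_goals simp_wf
  all_goals try (push_neg at h)
  all_goals try (obtain ⟨⟨h1, h2⟩, h3⟩ := h)
  all_goals try (obtain ⟨h1, h2⟩ := h)
  all_goals first
    | (apply Prod.Lex.left; omega)
    | (apply Prod.Lex.right; apply Prod.Lex.left; omega)
    | (apply Prod.Lex.right; apply Prod.Lex.right; omega)
def parseT_N (w : List Char) (i : Int) : List (Int × Int) :=
  let res := tFlatN w i (parseS_N w i)
  if h : i < (w.length : Int) ∧ PySem.List.pyGet? w i = some 'b' then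
    res ++ (parseT_N w (i+1)).map (fun p => (p.1, p.2 + 1))
  else res

termination_by (3 * (((w.length : Int)) - i).toNat + 2, 1, 0)
decreasing_by
  all_goals simp_wf
  all_goals try (push_neg at h)
  all_goals try (obtain ⟨⟨h1, h2⟩, h3⟩ := h)
  all_goals try (obtain ⟨h1, h2⟩ := h)
  all_goals first
    | (apply Prod.Lex.left; omega)
    | (apply Prod.Lex.right; apply Prod.Lex.left; omega)
    | (apply Prod.Lex.right; apply Prod.Lex.right; omega)
def tFlatN (w : List Char) (i : Int) (ss : List (Int × Int)) : List (Int × Int) :=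
  match ss with
  | [] => []
  | q :: rest =>
    ((if h : i < q.1 then parseS_N w q.1 else []).filter (fun p => p.2 == q.2)).map
        (fun p => (p.1, q.2 * p.2))
      ++ tFlatN w i rest
termination_by (3 * (((w.length : Int)) - i).toNat + 2, 0, ss.length)
decreasing_by
  all_goals simp_wf
  all_goals try (push_neg at h)
  all_goals try (obtain ⟨⟨h1, h2⟩, h3⟩ := h)
  all_goals try (obtain ⟨h1, h2⟩ := h)
  all_goals first
    | (apply Prod.Lex.left; omega)
    | (apply Prod.Lex.right; apply Prod.Lex.left; omega)
    | (apply Prod.Lex.right; apply Prod.Lex.right; omega)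
end

-- the memo invariant: every stored entry is the corresponding naive parse list
def GoodMemo (w : List Char) (m : PMemo) : Prop :=
  ∀ i v, (m.get? ("S", i) = some v → v = parseS_N w i)
       ∧ (m.get? ("P", i) = some v → v = parseP_N w i)
       ∧ (m.get? ("T", i) = some v → v = parseT_N w i)

theorem goodMemo_empty (w : List Char) : GoodMemo w PySem.Dict.empty := by
  intro i v
  refine ⟨?_, ?_, ?_⟩ <;> intro hg <;> simp [PySem.Dict.get?_empty] at hg

theorem goodMemo_insert_S (w : List Char) (m : PMemo) (i : Int) (hm : GoodMemo w m) :
    GoodMemo w (m.insert ("S", i) (parseS_N w i)) := by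
  intro j v
  refine ⟨fun hg => ?_, fun hg => ?_, fun hg => ?_⟩ <;>
    rw [PySem.Dict.get?_insert] at hg <;> split_ifs at hg with hk
  · simp only [Prod.mk.injEq] at hk
    rw [hk.2]; injection hg with hg'; exact hg'.symm
  · exact (hm j v).1 hg
  · simp only [Prod.mk.injEq] at hk; exact absurd hk.1 (by decide)
  · exact (hm j v).2.1 hg
  · simp only [Prod.mk.injEq] at hk; exact absurd hk.1 (by decide)
  · exact (hm j v).2.2 hg

theorem goodMemo_insert_P (w : List Char) (m : PMemo) (i : Int) (hm : GoodMemo w m) :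
    GoodMemo w (m.insert ("P", i) (parseP_N w i)) := by
  intro j v
  refine ⟨fun hg => ?_, fun hg => ?_, fun hg => ?_⟩ <;>
    rw [PySem.Dict.get?_insert] at hg <;> split_ifs at hg with hk
  · simp only [Prod.mk.injEq] at hk; exact absurd hk.1 (by decide)
  · exact (hm j v).1 hg
  · simp only [Prod.mk.injEq] at hk
    rw [hk.2]; injection hg with hg'; exact hg'.symm
  · exact (hm j v).2.1 hg
  · simp only [Prod.mk.injEq] at hk; exact absurd hk.1 (by decide)
  · exact (hm j v).2.2 hg

theorem goodMemo_insert_T (w : List Char) (m : PMemo) (i : Int) (hm : GoodMemo w m) :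
    GoodMemo w (m.insert ("T", i) (parseT_N w i)) := by
  intro j v
  refine ⟨fun hg => ?_, fun hg => ?_, fun hg => ?_⟩ <;>
    rw [PySem.Dict.get?_insert] at hg <;> split_ifs at hg with hk
  · simp only [Prod.mk.injEq] at hk; exact absurd hk.1 (by decide)
  · exact (hm j v).1 hg
  · simp only [Prod.mk.injEq] at hk; exact absurd hk.1 (by decide)
  · exact (hm j v).2.1 hg
  · simp only [Prod.mk.injEq] at hk
    rw [hk.2]; injection hg with hg'; exact hg'.symm
  · exact (hm j v).2.2 hg

theorem pFlatN_nil (w : List Char) (i : Int) : pFlatN w i [] = [] := by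
  rw [pFlatN.eq_def]

theorem pFlatN_cons (w : List Char) (i : Int) (p : Int × Int) (ts : List (Int × Int)) :
    pFlatN w i (p :: ts)
      = (if h : i ≤ p.1 ∧ p.1 < (w.length : Int) then parseP_N w (p.1 + 1) else [])
          ++ pFlatN w i ts := by
  rw [pFlatN.eq_def]

theorem tFlatN_nil (w : List Char) (i : Int) : tFlatN w i [] = [] := by
  rw [tFlatN.eq_def]

theorem tFlatN_cons (w : List Char) (i : Int) (q : Int × Int) (ss : List (Int × Int)) :
    tFlatN w i (q :: ss)
      = ((if h : i < q.1 then parseS_N w q.1 else []).filter (fun p => p.2 == q.2)).map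
            (fun p => (p.1, q.2 * p.2))
          ++ tFlatN w i ss := by
  rw [tFlatN.eq_def]


-- ===== B side: positions in every naive parse list lie in (i+1, n] =====
theorem boundsLemma (k : Nat) : ∀ (w : List Char) (i : Int),
    (3 * (((w.length : Int)) - i).toNat ≤ k →
      ∀ p ∈ parseS_N w i, i + 2 ≤ p.1 ∧ p.1 ≤ (w.length : Int)) ∧
    (3 * (((w.length : Int)) - i).toNat + 1 ≤ k →
      (∀ ts, ∀ p ∈ pFlatN w i ts, i + 2 ≤ p.1 ∧ p.1 ≤ (w.length : Int)) ∧
      (∀ p ∈ parseP_N w i, i + 2 ≤ p.1 ∧ p.1 ≤ (w.length : Int))) ∧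
    (3 * (((w.length : Int)) - i).toNat + 2 ≤ k →
      (∀ ss, ∀ p ∈ tFlatN w i ss, i + 2 ≤ p.1 ∧ p.1 ≤ (w.length : Int)) ∧
      (∀ p ∈ parseT_N w i, i + 2 ≤ p.1 ∧ p.1 ≤ (w.length : Int))) := by
  induction k using Nat.strong_induction_on with
  | _ k IH =>
  intro w i
  refine ⟨fun hk => ?_, fun hk => ?_, fun hk => ?_⟩
  · -- S
    rw [parseS_N.eq_def]
    split_ifs with h h2
    · simp
    all_goals
      push_neg at h
      intro p hp
      rw [List.mem_append] at hp
      rcases hp with hp | hp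
      · have := ((IH (k-1) (by omega) w (i+2)).2.1 (by omega)).2 p hp
        omega
      · simp only [List.mem_singleton] at hp
        subst hp
        dsimp only
        omega
  · -- pFlatN and P
    have hflat : ∀ ts, ∀ p ∈ pFlatN w i ts, i + 2 ≤ p.1 ∧ p.1 ≤ (w.length : Int) := by
      intro ts
      induction ts with
      | nil => intro p hp; rw [pFlatN_nil] at hp; simp at hp
      | cons q rest ihq =>
        intro p hp
        rw [pFlatN_cons, List.mem_append] at hp
        rcases hp with hp | hp
        · split_ifs at hp with hq
        -- in range: use IH at q.1+1
          · have := ((IH (k-1) (by omega) w (q.1+1)).2.1 (by omega)).2 p hp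
            omega
          · simp at hp
        · exact ihq p hp
    refine ⟨hflat, ?_⟩
    rw [parseP_N.eq_def]
    split_ifs with h
    · intro p hp
      rw [List.mem_append] at hp
      rcases hp with hp | hp
      · exact hflat _ p hp
      · rw [List.mem_map] at hp
        obtain ⟨q, hq, rfl⟩ := hp
        rw [List.mem_filter] at hq
        have hT := ((IH (k-1) (by omega) w (i+1)).2.2 (by omega)).2 q hq.1
        have hq2 := of_decide_eq_true hq.2
        constructor
        · omega
        · omega
    · simp
  · -- tFlatN and T
    have hflat : ∀ ss, ∀ p ∈ tFlatN w i ss, i + 2 ≤ p.1 ∧ p.1 ≤ (w.length : Int) := by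
      intro ss
      induction ss with
      | nil => intro p hp; rw [tFlatN_nil] at hp; simp at hp
      | cons q rest ihq =>
        intro p hp
        rw [tFlatN_cons, List.mem_append] at hp
        rcases hp with hp | hp
        · rw [List.mem_map] at hp
          obtain ⟨r, hr, rfl⟩ := hp
          rw [List.mem_filter] at hr
          revert hr
          split_ifs with hq
          · intro hr
            have := ((IH (k-1) (by omega) w q.1).1 (by omega)) r hr.1
            simp only
            omega
          · intro hr; simp at hr
        · exact ihq p hp
    refine ⟨hflat, ?_⟩
    rw [parseT_N.eq_def]
    dsimp only
    split_ifs with h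
    · intro p hp
      rw [List.mem_append] at hp
      rcases hp with hp | hp
      · exact hflat _ p hp
      · rw [List.mem_map] at hp
        obtain ⟨q, hq, rfl⟩ := hp
        have := ((IH (k-1) (by omega) w (i+1)).2.2 (by omega)).2 q hq
        simp only
        omega
    · intro p hp
      exact hflat _ p hp

theorem boundsS (w : List Char) (i : Int) :
    ∀ p ∈ parseS_N w i, i + 2 ≤ p.1 ∧ p.1 ≤ (w.length : Int) :=
  (boundsLemma (3 * (((w.length : Int)) - i).toNat) w i).1 (le_refl _)

theorem boundsT (w : List Char) (i : Int) :
    ∀ p ∈ parseT_N w i, i + 2 ≤ p.1 ∧ p.1 ≤ (w.length : Int) :=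
  ((boundsLemma (3 * (((w.length : Int)) - i).toNat + 2) w i).2.2 (le_refl _)).2

theorem pFoldA_spec (w : List Char) (f : Nat) (i : Int)
    (H : ∀ j (m : PMemo), GoodMemo w m → i ≤ j → j < (w.length : Int) →
        (parseP_A w f (j+1) m).1 = parseP_N w (j+1) ∧ GoodMemo w (parseP_A w f (j+1) m).2) :
    ∀ (ts acc : List (Int × Int)) (m : PMemo), GoodMemo w m → (∀ q ∈ ts, i ≤ q.1) →
      (ts.foldl (fun s p =>
          if decide (p.1 < (w.length : Int) ∧ PySem.List.pyGet? w p.1 = some 'a') then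
            (s.1 ++ (parseP_A w f (p.1 + 1) s.2).1, (parseP_A w f (p.1 + 1) s.2).2)
          else s) (acc, m)).1
        = acc ++ pFlatN w i (ts.filter
            (fun p => decide (p.1 < (w.length : Int) ∧ PySem.List.pyGet? w p.1 = some 'a')))
      ∧ GoodMemo w ((ts.foldl (fun s p =>
          if decide (p.1 < (w.length : Int) ∧ PySem.List.pyGet? w p.1 = some 'a') then
            (s.1 ++ (parseP_A w f (p.1 + 1) s.2).1, (parseP_A w f (p.1 + 1) s.2).2)
          else s) (acc, m)).2) := by
  intro ts
  induction ts with
  | nil =>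
    intro acc m hm _
    simp [pFlatN_nil, hm]
  | cons p rest ih =>
    intro acc m hm hbnd
    rw [List.foldl_cons, List.filter_cons]
    dsimp only
    by_cases hc : p.1 < (w.length : Int) ∧ PySem.List.pyGet? w p.1 = some 'a'
    · have hcd : (decide (p.1 < (w.length : Int) ∧ PySem.List.pyGet? w p.1 = some 'a')) = true := by
        simpa using hc
      rw [if_pos hcd, if_pos hcd]
      obtain ⟨hP, hG⟩ := H p.1 m hm (hbnd p (by simp)) hc.1
      obtain ⟨ih1, ih2⟩ := ih (acc ++ (parseP_A w f (p.1 + 1) m).1)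
        (parseP_A w f (p.1 + 1) m).2 hG (fun q hq => hbnd q (by simp [hq]))
      refine ⟨?_, ih2⟩
      have hg : i ≤ p.1 ∧ p.1 < (w.length : Int) := ⟨hbnd p (by simp), hc.1⟩
      rw [ih1, pFlatN_cons, dif_pos hg, hP, List.append_assoc]
    · have hcd : ¬ ((decide (p.1 < (w.length : Int) ∧ PySem.List.pyGet? w p.1 = some 'a')) = true) := by
        simpa using hc
      rw [if_neg hcd, if_neg hcd]
      exact ih acc m hm (fun q hq => hbnd q (by simp [hq]))

theorem tFoldA_spec (w : List Char) (f : Nat) (i : Int)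
    (H : ∀ j (m : PMemo), GoodMemo w m → i ≤ j →
        (parseS_A w f j m).1 = parseS_N w j ∧ GoodMemo w (parseS_A w f j m).2) :
    ∀ (ss acc : List (Int × Int)) (m : PMemo), GoodMemo w m → (∀ q ∈ ss, i < q.1) →
      (ss.foldl (fun s q =>
          ((parseS_A w f q.1 s.2).1.foldl
              (fun rr p => if p.2 == q.2 then rr ++ [(p.1, q.2 * p.2)] else rr) s.1,
           (parseS_A w f q.1 s.2).2)) (acc, m)).1
        = acc ++ tFlatN w i ss
      ∧ GoodMemo w ((ss.foldl (fun s q =>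
          ((parseS_A w f q.1 s.2).1.foldl
              (fun rr p => if p.2 == q.2 then rr ++ [(p.1, q.2 * p.2)] else rr) s.1,
           (parseS_A w f q.1 s.2).2)) (acc, m)).2) := by
  intro ss
  induction ss with
  | nil =>
    intro acc m hm _
    simp [tFlatN_nil, hm]
  | cons q rest ih =>
    intro acc m hm hbnd
    rw [List.foldl_cons]
    dsimp only
    have hq : i < q.1 := hbnd q (by simp)
    obtain ⟨hS, hG⟩ := H q.1 m hm (by omega)
    obtain ⟨ih1, ih2⟩ := ih
      ((parseS_A w f q.1 m).1.foldl
        (fun rr p => if p.2 == q.2 then rr ++ [(p.1, q.2 * p.2)] else rr) acc)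
      (parseS_A w f q.1 m).2 hG (fun r hr => hbnd r (by simp [hr]))
    refine ⟨?_, ih2⟩
    rw [ih1,
      PySem.List.foldl_append_if (fun p : Int × Int => p.2 == q.2)
        (fun p : Int × Int => (p.1, q.2 * p.2)),
      tFlatN_cons, dif_pos hq, hS, List.append_assoc]

theorem mainLemma : ∀ (fuel : Nat) (w : List Char) (i : Int) (m : PMemo), GoodMemo w m →
    (3 * (((w.length : Int)) - i).toNat < fuel →
      (parseS_A w fuel i m).1 = parseS_N w i ∧ GoodMemo w (parseS_A w fuel i m).2) ∧
    (3 * (((w.length : Int)) - i).toNat + 1 < fuel →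
      (parseP_A w fuel i m).1 = parseP_N w i ∧ GoodMemo w (parseP_A w fuel i m).2) ∧
    (3 * (((w.length : Int)) - i).toNat + 2 < fuel →
      (parseT_A w fuel i m).1 = parseT_N w i ∧ GoodMemo w (parseT_A w fuel i m).2) := by
  intro fuel
  induction fuel with
  | zero =>
    intro w i m hm
    exact ⟨fun h => absurd h (by omega), fun h => absurd h (by omega),
      fun h => absurd h (by omega)⟩
  | succ f IH =>
  intro w i m hm
  refine ⟨fun hk => ?_, fun hk => ?_, fun hk => ?_⟩
  · -- S
    simp only [parseS_A]
    cases hget : m.get? ("S", i) with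
    | some v => exact ⟨(hm i v).1 hget, hm⟩
    | none =>
      dsimp only
      by_cases hlen : i + 1 < (w.length : Int)
      · by_cases hab : PySem.List.slice w (some i) (some (i+2)) = ['a','b']
        · have hba : ¬ PySem.List.slice w (some i) (some (i+2)) = ['b','a'] := by
            rw [hab]; decide
          have hcab : i + 1 < (w.length : Int)
              ∧ PySem.List.slice w (some i) (some (i+2)) = ['a','b'] := ⟨hlen, hab⟩
          have hnba : ¬ (i + 1 < (w.length : Int)
              ∧ PySem.List.slice w (some i) (some (i+2)) = ['b','a']) := fun hh => hba hh.2
          have hB : parseS_N w i = parseP_N w (i+2) ++ [(i+2, (2 : Int))] := by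
            have hne : ¬ (i + 1 ≥ (w.length : Int) ∨
                (PySem.List.slice w (some i) (some (i+2)) ≠ ['a','b'] ∧
                 PySem.List.slice w (some i) (some (i+2)) ≠ ['b','a'])) := by
              rintro (hge | ⟨h1, h2⟩)
              · omega
              · exact h1 hab
            rw [parseS_N.eq_def, dif_neg hne, if_pos hab]
          obtain ⟨hP, hG⟩ := (IH w (i+2) m hm).2.1 (by omega)
          simp only [if_pos hcab, if_neg hnba]
          have hval : ([] : List (Int × Int)) ++ (parseP_A w f (i+2) m).1 ++ [(i+2, (2 : Int))]
              = parseS_N w i := by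
            rw [hP, hB]; simp
          rw [hval]
          exact ⟨rfl, goodMemo_insert_S w _ i hG⟩
        · by_cases hba : PySem.List.slice w (some i) (some (i+2)) = ['b','a']
          · have hcba : i + 1 < (w.length : Int)
                ∧ PySem.List.slice w (some i) (some (i+2)) = ['b','a'] := ⟨hlen, hba⟩
            have hnab : ¬ (i + 1 < (w.length : Int)
                ∧ PySem.List.slice w (some i) (some (i+2)) = ['a','b']) := fun hh => hab hh.2
            have hB : parseS_N w i = parseP_N w (i+2) ++ [(i+2, (3 : Int))] := by
              have hne : ¬ (i + 1 ≥ (w.length : Int) ∨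
                  (PySem.List.slice w (some i) (some (i+2)) ≠ ['a','b'] ∧
                   PySem.List.slice w (some i) (some (i+2)) ≠ ['b','a'])) := by
                rintro (hge | ⟨h1, h2⟩)
                · omega
                · exact h2 hba
              rw [parseS_N.eq_def, dif_neg hne, if_neg hab]
            obtain ⟨hP, hG⟩ := (IH w (i+2) m hm).2.1 (by omega)
            simp only [if_neg hnab, if_pos hcba]
            have hval : ([] : List (Int × Int)) ++ (parseP_A w f (i+2) m).1 ++ [(i+2, (3 : Int))]
                = parseS_N w i := by
              rw [hP, hB]; simp
            rw [hval]
            exact ⟨rfl, goodMemo_insert_S w _ i hG⟩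
          · have hnab : ¬ (i + 1 < (w.length : Int)
                ∧ PySem.List.slice w (some i) (some (i+2)) = ['a','b']) := fun hh => hab hh.2
            have hnba : ¬ (i + 1 < (w.length : Int)
                ∧ PySem.List.slice w (some i) (some (i+2)) = ['b','a']) := fun hh => hba hh.2
            have hB : parseS_N w i = [] := by
              rw [parseS_N.eq_def, dif_pos (Or.inr ⟨hab, hba⟩)]
            simp only [if_neg hnab, if_neg hnba]
            rw [← hB]
            exact ⟨rfl, goodMemo_insert_S w m i hm⟩
      · have hnab : ¬ (i + 1 < (w.length : Int)
            ∧ PySem.List.slice w (some i) (some (i+2)) = ['a','b']) := fun hh => hlen hh.1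
        have hnba : ¬ (i + 1 < (w.length : Int)
            ∧ PySem.List.slice w (some i) (some (i+2)) = ['b','a']) := fun hh => hlen hh.1
        have hB : parseS_N w i = [] := by
          rw [parseS_N.eq_def, dif_pos (Or.inl (by omega))]
        simp only [if_neg hnab, if_neg hnba]
        rw [← hB]
        exact ⟨rfl, goodMemo_insert_S w m i hm⟩
  · -- P
    simp only [parseP_A]
    cases hget : m.get? ("P", i) with
    | some v => exact ⟨(hm i v).2.1 hget, hm⟩
    | none =>
      dsimp only
      by_cases hb : i < (w.length : Int) ∧ PySem.List.pyGet? w i = some 'b'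
      · rw [if_pos hb]
        dsimp only
        obtain ⟨hT1, hG1⟩ := (IH w (i+1) m hm).2.2 (by omega)
        rw [hT1]
        have Hp : ∀ j (m' : PMemo), GoodMemo w m' → i ≤ j → j < (w.length : Int) →
            (parseP_A w f (j+1) m').1 = parseP_N w (j+1) ∧ GoodMemo w (parseP_A w f (j+1) m').2 := by
          intro j m' hm' hij hjL
          exact (IH w (j+1) m' hm').2.1 (by omega)
        have hbnd : ∀ q ∈ parseT_N w (i+1), i ≤ q.1 := by
          intro q hq
          have := boundsT w (i+1) q hq
          omega
        obtain ⟨hL1, hLG⟩ := pFoldA_spec w f i Hp (parseT_N w (i+1)) []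
          (parseT_A w f (i+1) m).2 hG1 hbnd
        obtain ⟨hT2, hG2⟩ := (IH w (i+1) _ hLG).2.2 (by omega)
        rw [PySem.List.foldl_append_if
            (fun p : Int × Int =>
              decide (p.1 < (w.length : Int) ∧ PySem.List.pyGet? w p.1 = some 'a'))
            (fun p : Int × Int => (p.1 + 1, p.2)),
          hT2, hL1]
        have hB : parseP_N w i
            = pFlatN w i ((parseT_N w (i+1)).filter
                (fun p : Int × Int =>
                  decide (p.1 < (w.length : Int) ∧ PySem.List.pyGet? w p.1 = some 'a')))
              ++ ((parseT_N w (i+1)).filter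
                (fun p : Int × Int =>
                  decide (p.1 < (w.length : Int) ∧ PySem.List.pyGet? w p.1 = some 'a'))).map
                (fun p : Int × Int => (p.1 + 1, p.2)) := by
          rw [parseP_N.eq_def, dif_pos hb]
        have hveq : (([] : List (Int × Int)) ++ pFlatN w i ((parseT_N w (i+1)).filter
                (fun p : Int × Int =>
                  decide (p.1 < (w.length : Int) ∧ PySem.List.pyGet? w p.1 = some 'a'))))
              ++ ((parseT_N w (i+1)).filter
                (fun p : Int × Int =>
                  decide (p.1 < (w.length : Int) ∧ PySem.List.pyGet? w p.1 = some 'a'))).map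
                (fun p : Int × Int => (p.1 + 1, p.2)) = parseP_N w i := by
          rw [hB]; simp
        rw [hveq]
        exact ⟨rfl, goodMemo_insert_P w _ i hG2⟩
      · rw [if_neg hb]
        have hB : parseP_N w i = [] := by rw [parseP_N.eq_def, dif_neg hb]
        rw [← hB]
        exact ⟨rfl, goodMemo_insert_P w m i hm⟩
  · -- T
    simp only [parseT_A]
    cases hget : m.get? ("T", i) with
    | some v => exact ⟨(hm i v).2.2 hget, hm⟩
    | none =>
      dsimp only
      obtain ⟨hS0, hG0⟩ := (IH w i m hm).1 (by omega)
      rw [hS0]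
      have Hs : ∀ j (m' : PMemo), GoodMemo w m' → i ≤ j →
          (parseS_A w f j m').1 = parseS_N w j ∧ GoodMemo w (parseS_A w f j m').2 := by
        intro j m' hm' hij
        exact (IH w j m' hm').1 (by omega)
      have hbnd : ∀ q ∈ parseS_N w i, i < q.1 := by
        intro q hq
        have := boundsS w i q hq
        omega
      obtain ⟨hL1, hLG⟩ := tFoldA_spec w f i Hs (parseS_N w i) [] (parseS_A w f i m).2 hG0 hbnd
      by_cases hb : i < (w.length : Int) ∧ PySem.List.pyGet? w i = some 'b'
      · rw [if_pos hb]
        dsimp only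
        obtain ⟨hT, hG2⟩ := (IH w (i+1) _ hLG).2.2 (by omega)
        rw [PySem.List.foldl_append_singleton_eq_map (fun p : Int × Int => (p.1, p.2 + 1)),
          hT, hL1]
        have hB : parseT_N w i
            = tFlatN w i (parseS_N w i)
              ++ (parseT_N w (i+1)).map (fun p : Int × Int => (p.1, p.2 + 1)) := by
          conv_lhs => rw [parseT_N.eq_def]
          dsimp only
          rw [dif_pos hb]
        have hveq : (([] : List (Int × Int)) ++ tFlatN w i (parseS_N w i))
              ++ (parseT_N w (i+1)).map (fun p : Int × Int => (p.1, p.2 + 1)) = parseT_N w i := by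
          rw [hB]; simp
        rw [hveq]
        exact ⟨rfl, goodMemo_insert_T w _ i hG2⟩
      · rw [if_neg hb]
        rw [hL1]
        have hB : parseT_N w i = tFlatN w i (parseS_N w i) := by
          conv_lhs => rw [parseT_N.eq_def]
          dsimp only
          rw [dif_neg hb]
        have hveq : ([] : List (Int × Int)) ++ tFlatN w i (parseS_N w i) = parseT_N w i := by
          rw [hB]; simp
        rw [hveq]
        exact ⟨rfl, goodMemo_insert_T w _ i hLG⟩

-- chart lookup reads off the naive list when the position is in range
theorem tblGetB_eq (k : Nat) (base : Int) (tbl : List (List (Int × Int)))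
    (f : Int → List (Int × Int)) (hlen : tbl.length = k)
    (h : ∀ m : Nat, m < k → tbl.getD m [] = f (base + m)) :
    ∀ j : Int, base ≤ j → j < base + k → tblGetB base tbl j = f j := by
  intro j h1 h2
  have hm : (j - base).toNat < k := by omega
  rw [tblGetB, h (j - base).toNat hm]
  congr 1
  omega

theorem flatMap_eq_pFlatN (w : List Char) (i : Int) (g : Int × Int → List (Int × Int)) :
    ∀ ls : List (Int × Int),
      (∀ q ∈ ls, (i ≤ q.1 ∧ q.1 < (w.length : Int)) ∧ g q = parseP_N w (q.1 + 1)) →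
      ls.flatMap g = pFlatN w i ls := by
  intro ls
  induction ls with
  | nil => intro _; rw [pFlatN_nil, List.flatMap_nil]
  | cons q rest ih =>
    intro hq
    rw [List.flatMap_cons, pFlatN_cons, dif_pos (hq q (by simp)).1,
      (hq q (by simp)).2, ih (fun r hr => hq r (by simp [hr]))]

theorem flatMap_eq_tFlatN (w : List Char) (i : Int)
    (g : Int × Int → List (Int × Int)) :
    ∀ ls : List (Int × Int),
      (∀ q ∈ ls, i < q.1 ∧ g q = parseS_N w q.1) →
      ls.flatMap (fun q => ((g q).filter (fun p => p.2 == q.2)).map (fun p => (p.1, q.2 * p.2)))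
        = tFlatN w i ls := by
  intro ls
  induction ls with
  | nil => intro _; rw [tFlatN_nil, List.flatMap_nil]
  | cons q rest ih =>
    intro hq
    rw [List.flatMap_cons, tFlatN_cons, dif_pos (hq q (by simp)).1,
      ← (hq q (by simp)).2, ih (fun r hr => hq r (by simp [hr]))]

theorem stepB_spec (w : List Char) (k : Nat) (hk : k ≤ w.length)
    (sT pT tT : List (List (Int × Int)))
    (hlen : sT.length = k ∧ pT.length = k ∧ tT.length = k)
    (htbl : ∀ m : Nat, m < k →
      sT.getD m [] = parseS_N w ((w.length : Int) - k + 1 + m) ∧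
      pT.getD m [] = parseP_N w ((w.length : Int) - k + 1 + m) ∧
      tT.getD m [] = parseT_N w ((w.length : Int) - k + 1 + m)) :
    stepB w ((w.length : Int) - k) sT pT tT =
      (parseS_N w ((w.length : Int) - k) :: sT,
       parseP_N w ((w.length : Int) - k) :: pT,
       parseT_N w ((w.length : Int) - k) :: tT) := by
  set i : Int := (w.length : Int) - k with hi
  have hSlook : ∀ j : Int, i + 1 ≤ j → j ≤ (w.length : Int) → tblGetB (i+1) sT j = parseS_N w j := by
    intro j h1 h2
    exact tblGetB_eq k (i+1) sT (parseS_N w) hlen.1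
      (fun m hm => (htbl m hm).1) j h1 (by omega)
  have hPlook : ∀ j : Int, i + 1 ≤ j → j ≤ (w.length : Int) → tblGetB (i+1) pT j = parseP_N w j := by
    intro j h1 h2
    exact tblGetB_eq k (i+1) pT (parseP_N w) hlen.2.1
      (fun m hm => (htbl m hm).2.1) j h1 (by omega)
  have hTlook : ∀ j : Int, i + 1 ≤ j → j ≤ (w.length : Int) → tblGetB (i+1) tT j = parseT_N w j := by
    intro j h1 h2
    exact tblGetB_eq k (i+1) tT (parseT_N w) hlen.2.2
      (fun m hm => (htbl m hm).2.2) j h1 (by omega)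
  simp only [stepB]
  -- the freshly computed S entry
  have hS : (if i + 1 < (w.length : Int) ∧ (PySem.List.slice w (some i) (some (i+2)) = ['a','b'] ∨
        PySem.List.slice w (some i) (some (i+2)) = ['b','a']) then
      tblGetB (i+1) pT (i+2) ++
        [(i+2, if PySem.List.slice w (some i) (some (i+2)) = ['a','b'] then (2 : Int) else 3)]
    else []) = parseS_N w i := by
    by_cases hC : i + 1 < (w.length : Int) ∧ (PySem.List.slice w (some i) (some (i+2)) = ['a','b'] ∨
        PySem.List.slice w (some i) (some (i+2)) = ['b','a'])
    · rw [if_pos hC]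
      have hD : ¬ (i + 1 ≥ (w.length : Int) ∨
          (PySem.List.slice w (some i) (some (i+2)) ≠ ['a','b'] ∧
           PySem.List.slice w (some i) (some (i+2)) ≠ ['b','a'])) := by
        rintro (hge | ⟨ha, hb⟩)
        · omega
        · rcases hC.2 with h | h
          · exact ha h
          · exact hb h
      rw [parseS_N.eq_def, dif_neg hD, hPlook (i+2) (by omega) (by omega)]
    · rw [if_neg hC]
      have hD : i + 1 ≥ (w.length : Int) ∨
          (PySem.List.slice w (some i) (some (i+2)) ≠ ['a','b'] ∧
           PySem.List.slice w (some i) (some (i+2)) ≠ ['b','a']) := by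
        by_cases hn1 : i + 1 < (w.length : Int)
        · right
          constructor <;> intro hh <;> exact hC ⟨hn1, by simp [hh]⟩
        · left; omega
      rw [parseS_N.eq_def, dif_pos hD]
  rw [hS]
  -- the freshly computed T body (before the bT extension)
  have hT0 : (parseS_N w i).flatMap (fun q =>
      ((tblGetB (i+1) sT q.1).filter (fun p => p.2 == q.2)).map (fun p => (p.1, q.2 * p.2)))
      = tFlatN w i (parseS_N w i) := by
    apply flatMap_eq_tFlatN
    intro q hq
    have hb := boundsS w i q hq
    exact ⟨by omega, hSlook q.1 (by omega) hb.2⟩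
  by_cases hb : i < (w.length : Int) ∧ PySem.List.pyGet? w i = some 'b'
  · rw [if_pos hb]
    have hTl := hTlook (i+1) (by omega) (by omega)
    have hT : tFlatN w i (parseS_N w i) ++
        (tblGetB (i+1) tT (i+1)).map (fun p => (p.1, p.2 + 1)) = parseT_N w i := by
      conv_rhs => rw [parseT_N.eq_def]
      dsimp only
      rw [dif_pos hb, hTl]
    have hP : ((tblGetB (i+1) tT (i+1)).filter
          (fun q => decide (q.1 < (w.length : Int) ∧ PySem.List.pyGet? w q.1 = some 'a'))).flatMap
            (fun q => tblGetB (i+1) pT (q.1 + 1)) ++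
        ((tblGetB (i+1) tT (i+1)).filter
          (fun q => decide (q.1 < (w.length : Int) ∧ PySem.List.pyGet? w q.1 = some 'a'))).map
            (fun q => (q.1 + 1, q.2)) = parseP_N w i := by
      conv_rhs => rw [parseP_N.eq_def]
      rw [dif_pos hb]
      dsimp only
      rw [hTl]
      congr 1
      apply flatMap_eq_pFlatN
      intro q hq
      rw [List.mem_filter] at hq
      have hbnd := boundsT w (i+1) q hq.1
      have hq2 := of_decide_eq_true hq.2
      exact ⟨⟨by omega, hq2.1⟩, hPlook (q.1+1) (by omega) (by omega)⟩
    rw [hT0, hT, hP]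
  · rw [if_neg hb]
    have hT : tFlatN w i (parseS_N w i) = parseT_N w i := by
      conv_rhs => rw [parseT_N.eq_def]
      rw [dif_neg hb]
    have hP : parseP_N w i = [] := by rw [parseP_N.eq_def, dif_neg hb]
    rw [hT0, hT, hP]

theorem tablesB_spec (w : List Char) : ∀ k : Nat, k ≤ w.length + 1 →
    ((tablesB w k).1.length = k ∧ (tablesB w k).2.1.length = k ∧ (tablesB w k).2.2.length = k) ∧
    ∀ m : Nat, m < k →
      (tablesB w k).1.getD m [] = parseS_N w ((w.length : Int) - k + 1 + m) ∧
      (tablesB w k).2.1.getD m [] = parseP_N w ((w.length : Int) - k + 1 + m) ∧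
      (tablesB w k).2.2.getD m [] = parseT_N w ((w.length : Int) - k + 1 + m) := by
  intro k
  induction k with
  | zero => intro _; exact ⟨⟨rfl, rfl, rfl⟩, fun m hm => absurd hm (by omega)⟩
  | succ k ih =>
    intro hk
    obtain ⟨⟨l1, l2, l3⟩, hm⟩ := ih (by omega)
    have hstep := stepB_spec w k (by omega) (tablesB w k).1 (tablesB w k).2.1 (tablesB w k).2.2
      ⟨l1, l2, l3⟩ (fun m hmk => by
        refine ⟨(hm m hmk).1, (hm m hmk).2.1, (hm m hmk).2.2⟩)
    have heq : tablesB w (k+1) =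
        (parseS_N w ((w.length : Int) - k) :: (tablesB w k).1,
         parseP_N w ((w.length : Int) - k) :: (tablesB w k).2.1,
         parseT_N w ((w.length : Int) - k) :: (tablesB w k).2.2) := by
      rw [tablesB]
      exact hstep
    rw [heq]
    refine ⟨⟨by simp [l1], by simp [l2], by simp [l3]⟩, ?_⟩
    intro m hmk
    cases m with
    | zero =>
      refine ⟨?_, ?_, ?_⟩ <;> · simp only [List.getD_cons_zero]; congr 1; push_cast; ring
    | succ m' =>
      have h' := hm m' (by omega)
      refine ⟨?_, ?_, ?_⟩ <;>
        · simp only [List.getD_cons_succ]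
          first
          | rw [h'.1] | rw [h'.2.1] | rw [h'.2.2]
          congr 1
          push_cast
          ring

theorem any_eq_len (l : List (Int × Int)) (n : Int) :
    l.any (fun p => p.1 == n)
      = decide (((l.filter (fun p => p.1 == n)).map (fun p : Int × Int => p.2)).length > 0) := by
  rw [Bool.eq_iff_iff]
  simp [List.any_eq_true, List.length_pos_iff, List.filter_eq_nil_iff]

-- ===== VERDICT (by name: the statement is the Claim_ definition above) =====
theorem parse_optimal_spec : Claim_equal_parse_optimal := by
  intro word _
  unfold Spec_parse_optimal parse_optimal parse_optimal_alt
  have hA := (mainLemma (3 * word.toList.length + 1) word.toList 0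
      PySem.Dict.empty (goodMemo_empty _)).1 (by omega)
  have hB := (tablesB_spec word.toList (word.toList.length + 1) (le_refl _)).2 0 (by omega)
  have hB0 : (tablesB word.toList (word.toList.length + 1)).1.getD 0 [] = parseS_N word.toList 0 := by
    rw [hB.1]; congr 1; push_cast; ring
  simp only [hA.1, hB0, any_eq_len]
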